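-- pv_equiv track=rewrite | github.com/shekhar1luitel/quizHub | services/api/app/core/difficulty.py | difficulty_label
-- ===== SOURCE A (Python) =====
-- from typing import Optional, Sequence, Set
--
-- def normalized_difficulty(value: Optional[str]) -> Optional[str]:
--     """Normalize free-form difficulty strings into consistent labels."""
--     if value is None:
--         return None
--     trimmed = value.strip()
--     if not trimmed:
--         return None
--     lowered = trimmed.lower()
--     mapping = {
--         "easy": "Easy",
--         "medium": "Medium",
--         "hard": "Hard",
--     }
--     return mapping.get(lowered, trimmed)
--
-- def difficulty_label(difficulties: Sequence[str]) -> str: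
--     """Return a human-friendly label for a sequence of difficulty values."""
--     unique: Set[Optional[str]] = {normalized_difficulty(difficulty) for difficulty in difficulties if difficulty}
--     unique.discard(None)
--     if not unique:
--         return "Mixed"
--     if len(unique) == 1:
--         # unique is non-empty, so retrieving the single element is safe
--         return next(iter(unique)) or "Mixed"
--     return "Mixed"
-- ===== SOURCE B (Python) =====
-- from typing import Optional, Sequence
--
--
-- def normalized_difficulty(value: Optional[str]) -> Optional[str]:
--     """Normalize free-form difficulty strings into consistent labels."""
--     if value is None:
--         return None
--     trimmed = value.strip()
--     if not trimmed:
--         return None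
--     lowered = trimmed.lower()
--     mapping = {
--         "easy": "Easy",
--         "medium": "Medium",
--         "hard": "Hard",
--     }
--     return mapping.get(lowered, trimmed)
--
--
-- def difficulty_label(difficulties: Sequence[str]) -> str:
--     """Return a human-friendly label for a sequence of difficulty values."""
--     candidate: Optional[str] = None
--     for difficulty in difficulties:
--         if not difficulty:
--             continue
--         normalized = normalized_difficulty(difficulty)
--         if normalized is None:
--             continue
--         if candidate is None:
--             candidate = normalized
--         elif normalized != candidate:
--             return "Mixed"
--     return candidate if candidate is not None else "Mixed"
-- ===== Notes on version B (the rewrite author's own statement) =====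
-- stated objective: simpler
-- what changed: Replaces the set comprehension + discard + len()==1 inspection with a single scalar 'candidate' pass that returns 'Mixed' immediately when a second distinct normalized value appears.
import Mathlib
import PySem

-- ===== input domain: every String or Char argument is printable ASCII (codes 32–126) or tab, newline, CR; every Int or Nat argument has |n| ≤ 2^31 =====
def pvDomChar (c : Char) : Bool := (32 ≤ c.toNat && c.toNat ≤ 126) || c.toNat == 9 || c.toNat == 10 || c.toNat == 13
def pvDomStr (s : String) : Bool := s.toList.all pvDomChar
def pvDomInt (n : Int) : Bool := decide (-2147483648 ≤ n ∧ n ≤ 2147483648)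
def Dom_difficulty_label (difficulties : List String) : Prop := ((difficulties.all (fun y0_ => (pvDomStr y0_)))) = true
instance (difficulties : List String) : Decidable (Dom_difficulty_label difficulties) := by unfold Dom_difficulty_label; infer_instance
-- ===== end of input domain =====

-- B replaces A's "collect the set of normalized values, then inspect its size" with a single
-- scalar-candidate pass that returns "Mixed" as soon as a second distinct value appears (simpler).

-- ===== PORT A =====
-- shared helper: Python's normalized_difficulty (the None branch is unreachable here:
-- difficulty_label only calls it on the str elements of the sequence, so value : String)
def normalized_difficulty (value : String) : Option String :=
  let trimmed := PySem.Str.strip value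
  if trimmed = "" then none
  else
    let lowered := PySem.Str.lower trimmed
    -- literal dict lookup mapping.get(lowered, trimmed), ported as the branch chain it denotes
    if lowered = "easy" then some "Easy"
    else if lowered = "medium" then some "Medium"
    else if lowered = "hard" then some "Hard"
    else some trimmed

-- the set-comprehension loop body: {normalized_difficulty(d) for d in difficulties if d}
def diffStep (s : PySem.Set (Option String)) (d : String) : PySem.Set (Option String) :=
  if d ≠ "" then PySem.Set.add s (normalized_difficulty d) else s

-- unique.discard(None); if not unique: …; if len(unique)==1: next(iter(unique)) or "Mixed"; "Mixed"
def diffFinish (unique0 : PySem.Set (Option String)) : String :=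
  -- unique = unique0 with None discarded
  if PySem.Set.discard unique0 none = [] then "Mixed"
  else if PySem.List.len (PySem.Set.discard unique0 none) = 1 then
    match (PySem.Set.discard unique0 none).head? with
    | some (some v) => if v = "" then "Mixed" else v   -- "x or 'Mixed'"
    | _ => "Mixed"
  else "Mixed"

def difficulty_label (difficulties : List String) : String :=
  diffFinish (difficulties.foldl diffStep PySem.Set.empty)

-- ===== PORT B =====
def diffGo (cand : Option String) : List String → String
  | [] => match cand with | some c => c | none => "Mixed"
  | d :: rest =>
    if d = "" then diffGo cand rest
    else
      match normalized_difficulty d with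
      | none => diffGo cand rest
      | some v =>
        match cand with
        | none => diffGo (some v) rest
        | some c => if v ≠ c then "Mixed" else diffGo cand rest

def difficulty_label_alt (difficulties : List String) : String :=
  diffGo none difficulties

-- ===== PRECONDITION & SPEC =====
def Spec_difficulty_label (difficulties : List String) (out : String) : Prop := out = difficulty_label_alt difficulties
instance (difficulties : List String) (out : String) : Decidable (Spec_difficulty_label difficulties out) := by unfold Spec_difficulty_label; infer_instance

-- ===== CLAIM (what is proved, stated in full; the proofs are below) =====
def Claim_equal_difficulty_label : Prop := ∀ (difficulties : List String), Dom_difficulty_label difficulties → Spec_difficulty_label difficulties (difficulty_label difficulties)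

-- ===== LEMMAS AND PROOFS =====

-- normalized_difficulty never returns some ""
lemma normalized_ne_empty {d v : String} (h : normalized_difficulty d = some v) : v ≠ "" := by
  intro hv
  subst hv
  unfold normalized_difficulty at h
  simp only at h
  split_ifs at h with h1 h2 h3 h4
  -- the "trimmed = ''" branch (none = some "") is closed by split_ifs itself
  · exact absurd (Option.some.inj h) (by decide)
  · exact absurd (Option.some.inj h) (by decide)
  · exact absurd (Option.some.inj h) (by decide)
  · exact h1 (Option.some.inj h)

-- the non-None part of the accumulated set
def nn (s : PySem.Set (Option String)) : List (Option String) :=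
  s.filter (fun y => !(y == (none : Option String)))

lemma discard_none_eq_nn (s : PySem.Set (Option String)) : PySem.Set.discard s none = nn s := rfl

lemma nn_add_none (s : PySem.Set (Option String)) :
    nn (PySem.Set.add s none) = nn s := by
  unfold PySem.Set.add
  split
  · rfl
  · simp [nn, List.filter_append]

lemma nn_add_some (s : PySem.Set (Option String)) (v : String) :
    nn (PySem.Set.add s (some v)) = if (some v) ∈ s then nn s else nn s ++ [some v] := by
  unfold PySem.Set.add
  split <;> rename_i h
  · simp_all
  · have : ¬ (some v) ∈ s := by
      intro hm; exact h (by simpa [PySem.Set.contains_iff] using hm)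
    simp [nn, List.filter_append, this]

lemma mem_of_mem_nn {s : PySem.Set (Option String)} {x : Option String} (h : x ∈ nn s) : x ∈ s :=
  List.mem_of_mem_filter h

lemma mem_nn_of_mem_some {s : PySem.Set (Option String)} {v : String} (h : some v ∈ s) :
    some v ∈ nn s := by
  simp [nn, List.mem_filter, h]

-- once two distinct non-None values are in the set, A's answer is "Mixed" no matter the rest
lemma loop_mixed : ∀ (rest : List String) (s : PySem.Set (Option String)),
    2 ≤ (nn s).length → diffFinish (rest.foldl diffStep s) = "Mixed" := by
  intro rest
  induction rest with
  | nil =>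
    intro s h2
    unfold diffFinish
    rw [discard_none_eq_nn]
    have hne : nn s ≠ [] := by intro h; simp [h] at h2
    have hl : (nn s).length ≠ 1 := by omega
    simp only [List.foldl_nil]
    simp [hne, hl]
  | cons d rest ih =>
    intro s h2
    simp only [List.foldl_cons]
    apply ih
    unfold diffStep
    split
    · cases hnd : normalized_difficulty d with
      | none => rw [nn_add_none]; exact h2
      | some v =>
        rw [nn_add_some]
        split
        · exact h2
        · simp only [List.length_append, List.length_cons, List.length_nil]; omega
    · exact h2

-- main invariant: the set's non-None part tracks B's candidate
lemma loop_eq : ∀ (rest : List String) (s : PySem.Set (Option String)) (cand : Option String),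
    ((nn s = [] ∧ cand = none) ∨ (∃ c, nn s = [some c] ∧ cand = some c ∧ c ≠ "")) →
    diffFinish (rest.foldl diffStep s) = diffGo cand rest := by
  intro rest
  induction rest with
  | nil =>
    intro s cand hinv
    rcases hinv with ⟨h0, hc⟩ | ⟨c, h1, hc, hce⟩
    · subst hc
      unfold diffFinish
      simp only [List.foldl_nil, discard_none_eq_nn, h0]
      simp [diffGo]
    · subst hc
      unfold diffFinish
      simp only [List.foldl_nil, discard_none_eq_nn, h1]
      simp [diffGo, PySem.List.len_eq, hce]
  | cons d rest ih =>
    intro s cand hinv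
    simp only [List.foldl_cons]
    by_cases hd : d = ""
    · subst hd
      rw [show diffStep s "" = s by simp [diffStep]]
      rw [show diffGo cand ("" :: rest) = diffGo cand rest by cases cand <;> simp [diffGo]]
      exact ih s cand hinv
    · have hstep : diffStep s d = PySem.Set.add s (normalized_difficulty d) := by
        simp [diffStep, hd]
      rw [hstep]
      cases hnd : normalized_difficulty d with
      | none =>
        rw [show diffGo cand (d :: rest) = diffGo cand rest by
          cases cand <;> simp [diffGo, hd, hnd]]
        apply ih
        rw [nn_add_none]; exact hinv
      | some v =>
        have hv : v ≠ "" := normalized_ne_empty hnd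
        rcases hinv with ⟨h0, hc⟩ | ⟨c, h1, hc, hce⟩
        · -- candidate unset: adopt v
          subst hc
          rw [show diffGo none (d :: rest) = diffGo (some v) rest by
            simp [diffGo, hd, hnd]]
          apply ih
          right; refine ⟨v, ?_, rfl, hv⟩
          rw [nn_add_some]
          have : ¬ (some v) ∈ s := by
            intro hm
            have := mem_nn_of_mem_some hm
            simp [h0] at this
          simp [this, h0]
        · -- candidate = c
          subst hc
          by_cases hvc : v = c
          · subst hvc
            rw [show diffGo (some v) (d :: rest) = diffGo (some v) rest by
              simp [diffGo, hd, hnd]]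
            apply ih
            right; refine ⟨v, ?_, rfl, hv⟩
            rw [nn_add_some]
            have hm : (some v) ∈ s := mem_of_mem_nn (by simp [h1])
            simp [hm, h1]
          · -- second distinct value: A ends up with a 2-element set, B returns "Mixed"
            rw [show diffGo (some c) (d :: rest) = "Mixed" by
              simp [diffGo, hd, hnd, hvc]]
            apply loop_mixed
            rw [nn_add_some]
            have : ¬ (some v) ∈ s := by
              intro hm
              have := mem_nn_of_mem_some hm
              rw [h1] at this
              simp [hvc] at this
            simp [this, h1]

-- ===== VERDICT (by name: the statement is the Claim_ definition above) =====
theorem difficulty_label_spec : Claim_equal_difficulty_label := by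
  intro difficulties _
  unfold Spec_difficulty_label difficulty_label difficulty_label_alt
  exact loop_eq difficulties PySem.Set.empty none (Or.inl ⟨rfl, rfl⟩)
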